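-- pv_equiv track=rewrite | github.com/szmbthydmnk/advent_of_code_solutions | 2025/python/working_but_not_finished_solution/Day_06.py | split_columns_to_matrix
-- ===== SOURCE A (Python) =====
-- def split_columns_to_matrix(lines):
--     if isinstance(lines, str):
--         lines = lines.splitlines()
--     else:
--         lines = [ln.rstrip("\n") for ln in lines]
--
--     if not lines:
--         return []
--
--     # Pad lines to same length to preserve alignment
--     maxlen = max(len(ln) for ln in lines)
--     lines = [ln.ljust(maxlen) for ln in lines]
--
--     # Find contiguous spans of columns that contain any non-space in any row
--     any_non_space = [any(ln[c] != " " for ln in lines) for c in range(maxlen)]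
--     spans = []
--     c = 0
--     while c < maxlen:
--         if any_non_space[c]:
--             start = c
--             while c < maxlen and any_non_space[c]:
--                 c += 1
--             spans.append((start, c))
--         else:
--             c += 1
--
--     # Build a matrix (rows x width) for each span, excluding the last line
--     matrices = []
--     for start, end in spans:
--         matrix = [list(row[start:end]) for row in lines[:-1]]
--         matrices.append(matrix)
--
--     return matrices
-- ===== SOURCE B (Python) =====
-- from itertools import groupby
--
--
-- def split_columns_to_matrix(lines):
--     if isinstance(lines, str):
--         lines = lines.splitlines()
--     else:
--         lines = [ln.rstrip("\n") for ln in lines]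
--
--     if not lines:
--         return []
--
--     width = max(len(ln) for ln in lines)
--     padded = [ln.ljust(width) for ln in lines]
--
--     # Transpose into columns; a column is a separator iff it is all spaces.
--     cols = list(zip(*padded))
--     nrows = len(padded) - 1  # matrices exclude the last input line
--
--     matrices = []
--     for blank, run in groupby(cols, key=lambda col: all(ch == " " for ch in col)):
--         if blank:
--             continue
--         run = list(run)
--         matrices.append([[col[i] for col in run] for i in range(nrows)])
--     return matrices
-- ===== Notes on version B (the rewrite author's own statement) =====
-- stated objective: idiomatic
-- what changed: B pads the lines, transposes them with zip(*padded), classifies whole columns as blank/non-blank and segments them with itertools.groupby, rebuilding each sub-matrix from the column run, instead of A's index-based while-loop over a per-column boolean array with row slicing.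
import Mathlib
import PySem

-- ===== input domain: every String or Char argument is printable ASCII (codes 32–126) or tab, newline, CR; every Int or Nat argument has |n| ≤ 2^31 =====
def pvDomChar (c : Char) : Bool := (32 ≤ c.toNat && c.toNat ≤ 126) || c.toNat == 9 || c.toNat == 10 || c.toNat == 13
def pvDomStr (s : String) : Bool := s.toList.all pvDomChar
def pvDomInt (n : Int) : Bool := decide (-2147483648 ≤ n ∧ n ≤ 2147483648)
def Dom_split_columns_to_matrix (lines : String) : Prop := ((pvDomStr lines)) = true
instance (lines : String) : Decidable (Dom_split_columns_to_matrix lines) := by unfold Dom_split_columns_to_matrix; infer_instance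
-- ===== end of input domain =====

-- B replaces A's index-based while-loop over a per-column boolean array with a transpose
-- (zip(*rows)) of the padded lines followed by grouping maximal runs of non-blank columns
-- (objective: more idiomatic; same asymptotic cost).

-- ===== PORT A =====

-- inner 'while c < maxlen and any_non_space[c]: c += 1' of A's span scan
def pvScanEnd (ans : List Bool) (c : Nat) : Nat :=
  if h : c < ans.length then
    if ans[c] then pvScanEnd ans (c + 1) else c
  else c
termination_by ans.length - c

-- needed by pvSpans' termination proof (cited in decreasing_by)
theorem pvScanEnd_ge (ans : List Bool) (c : Nat) : c ≤ pvScanEnd ans c := by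
  fun_induction pvScanEnd ans c with
  | case1 _ _ _ ih => omega
  | case2 => omega
  | case3 => omega

-- outer 'while c < maxlen' loop of A collecting (start, end) spans
def pvSpans (ans : List Bool) (c : Nat) : List (Nat × Nat) :=
  if h : c < ans.length then
    if ans[c] then
      (c, pvScanEnd ans (c + 1)) :: pvSpans ans (pvScanEnd ans (c + 1))
    else pvSpans ans (c + 1)
  else []
termination_by ans.length - c
decreasing_by
  · have := pvScanEnd_ge ans (c + 1); omega
  · omega

def split_columns_to_matrix (lines : String) : List (List (List String)) :=
  let rows := (PySem.Str.splitlines lines).map String.toList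
  if rows = [] then []
  else
    -- max(len(ln) for ln in lines): lengths are Nats, so the fold may start at 0
    let maxlen := (rows.map List.length).foldl max 0
    -- ln.ljust(maxlen)
    let padded := rows.map (fun r => r ++ List.replicate (maxlen - r.length) ' ')
    -- [any(ln[c] != " " for ln in lines) for c in range(maxlen)]; ln[c] is in range (rows padded)
    let ans := (List.range maxlen).map (fun c => padded.any (fun ln => ln.getD c ' ' != ' '))
    let spans := pvSpans ans 0
    -- for start, end in spans: matrices.append([list(row[start:end]) for row in lines[:-1]])
    spans.foldl
      (fun acc se =>
        acc ++ [(PySem.List.slice padded none (some (-1))).map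
          (fun row => (PySem.List.slice row (some (se.1 : Int)) (some (se.2 : Int))).map
            (fun ch => String.ofList [ch]))])
      []

-- ===== PORT B =====

def pvIsBlank (col : List Char) : Bool := col.all (fun ch => ch == ' ')

-- zip(*rows): truncates at the first exhausted row (exact for Python's zip on lists)
def pvZipN (rows : List (List Char)) : List (List Char) :=
  if h : rows = [] ∨ rows.any List.isEmpty then []
  else rows.map (fun r => r.headD ' ') :: pvZipN (rows.map List.tail)
termination_by (rows.headD []).length
decreasing_by
  match rows, h with
  | a :: t, h =>
    simp only [not_or, List.any_cons, Bool.or_eq_true, not_exists, Bool.not_eq_true] at h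
    simp only [List.map_cons, List.headD_cons]
    cases a with
    | nil => simp [List.isEmpty] at h
    | cons x xs => simp

-- itertools.groupby(cols, key=blank), keeping only the non-blank runs
def pvGroups (cols : List (List Char)) : List (List (List Char)) :=
  match cols with
  | [] => []
  | c :: rest =>
    if pvIsBlank c then pvGroups rest
    else (c :: rest.takeWhile (fun x => !pvIsBlank x)) ::
         pvGroups (rest.dropWhile (fun x => !pvIsBlank x))
termination_by cols.length
decreasing_by
  · simp
  · have := List.length_dropWhile_le (p := fun x => !pvIsBlank x) (l := rest); simp; omega

def split_columns_to_matrix_alt (lines : String) : List (List (List String)) :=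
  let rows := (PySem.Str.splitlines lines).map String.toList
  if rows = [] then []
  else
    let width := (rows.map List.length).foldl max 0
    let padded := rows.map (fun r => r ++ List.replicate (width - r.length) ' ')
    let cols := pvZipN padded
    -- [[col[i] for col in run] for i in range(nrows)]; col[i] is in range (i < number of rows)
    (pvGroups cols).map (fun run =>
      (List.range (padded.length - 1)).map (fun i =>
        run.map (fun col => String.ofList [col.getD i ' '])))

-- ===== PRECONDITION & SPEC =====
def Spec_split_columns_to_matrix (lines : String) (out : List (List (List String))) : Prop := out = split_columns_to_matrix_alt lines
instance (lines : String) (out : List (List (List String))) : Decidable (Spec_split_columns_to_matrix lines out) := by unfold Spec_split_columns_to_matrix; infer_instance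

-- ===== CLAIM (what is proved, stated in full; the proofs are below) =====
def Claim_equal_split_columns_to_matrix : Prop := ∀ (lines : String), Dom_split_columns_to_matrix lines → Spec_split_columns_to_matrix lines (split_columns_to_matrix lines)

-- ===== LEMMAS AND PROOFS =====

theorem pvScanEnd_le (ans : List Bool) (c : Nat) (h : c ≤ ans.length) :
    pvScanEnd ans c ≤ ans.length := by
  fun_induction pvScanEnd ans c with
  | case1 c h' htrue ih => exact ih (by omega)
  | case2 => omega
  | case3 => omega

theorem pvScanEnd_true (ans : List Bool) (c : Nat) :
    ∀ i, c ≤ i → i < pvScanEnd ans c → ans.getD i false = true := by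
  fun_induction pvScanEnd ans c with
  | case1 c h' htrue ih =>
    intro i hci hie
    rcases Nat.eq_or_lt_of_le hci with rfl | hlt
    · simpa [List.getD, h'] using htrue
    · exact ih i hlt hie
  | case2 c h' hfalse => intro i hci hie; omega
  | case3 c h' => intro i hci hie; omega

theorem pvScanEnd_stop (ans : List Bool) (c : Nat) :
    pvScanEnd ans c < ans.length → ans.getD (pvScanEnd ans c) false = false := by
  fun_induction pvScanEnd ans c with
  | case1 c h' htrue ih => exact ih
  | case2 c h' hfalse => intro _; rw [List.getD_eq_getElem _ _ h']; simpa using hfalse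
  | case3 c h' => intro hlt; omega

theorem pvSpans_bounds (ans : List Bool) (c : Nat) :
    ∀ se ∈ pvSpans ans c, c ≤ se.1 ∧ se.1 < se.2 ∧ se.2 ≤ ans.length := by
  fun_induction pvSpans ans c with
  | case1 c h htrue ih =>
    intro se hse
    rcases List.mem_cons.mp hse with rfl | hmem
    · dsimp only
      exact ⟨le_rfl, by have := pvScanEnd_ge ans (c + 1); omega,
        pvScanEnd_le ans (c + 1) (by omega)⟩
    · have h1 := ih se hmem
      have h2 := pvScanEnd_ge ans (c + 1)
      exact ⟨by omega, h1.2.1, h1.2.2⟩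
  | case2 c h hfalse ih =>
    intro se hse
    have := ih se hse
    exact ⟨by omega, this.2.1, this.2.2⟩
  | case3 c h => intro se hse; simp at hse

-- takeWhile/dropWhile of a list whose first k elements satisfy the predicate, element k does not
theorem takeWhile_eq_take_of {α : Type} (p : α → Bool) (l : List α) (k : Nat)
    (hk : k ≤ l.length)
    (htrue : ∀ i (hi : i < k), p (l[i]'(by omega)) = true)
    (hstop : ∀ (hlt : k < l.length), p (l[k]'hlt) = false) :
    l.takeWhile p = l.take k ∧ l.dropWhile p = l.drop k := by
  induction l generalizing k with
  | nil => simp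
  | cons a t ih =>
    cases k with
    | zero =>
      have := hstop (by simp)
      simp at this
      simp [List.takeWhile_cons, List.dropWhile_cons, this]
    | succ k =>
      have ha : p a = true := htrue 0 (by omega)
      have := ih k (by simpa using hk)
        (fun i hi => htrue (i + 1) (by omega))
        (fun hlt => hstop (by simpa using Nat.succ_lt_succ hlt))
      simp [List.takeWhile_cons, List.dropWhile_cons, ha, this.1, this.2]

-- the span scan over the boolean column classification produces exactly the non-blank runs
theorem groups_eq_spans (ans : List Bool) (cols : List (List Char))
    (hlen : ans.length = cols.length)
    (hk : ∀ i (hi : i < ans.length), ans[i] = !pvIsBlank (cols[i]'(hlen ▸ hi))) :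
    ∀ c, pvGroups (cols.drop c) =
      (pvSpans ans c).map (fun se => (cols.drop se.1).take (se.2 - se.1)) := by
  intro c
  fun_induction pvSpans ans c with
  | case3 c h =>
    have : cols.drop c = [] := List.drop_eq_nil_of_le (by omega)
    simp [this, pvGroups]
  | case2 c h hfalse ih =>
    have hf : ans[c] = false := by simpa using hfalse
    have hdrop : cols.drop c = cols[c]'(by omega) :: cols.drop (c + 1) :=
      List.drop_eq_getElem_cons (by omega)
    have hblank : pvIsBlank (cols[c]'(by omega)) = true := by
      have h2 := hk c h; rw [hf] at h2; simpa using h2.symm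
    rw [hdrop, pvGroups, if_pos hblank, ih]
  | case1 c h htrue ih =>
    set e := pvScanEnd ans (c + 1) with he
    have hce : c + 1 ≤ e := pvScanEnd_ge ans (c + 1)
    have hel : e ≤ ans.length := pvScanEnd_le ans (c + 1) (by omega)
    have hdrop : cols.drop c = cols[c]'(by omega) :: cols.drop (c + 1) :=
      List.drop_eq_getElem_cons (by omega)
    have hblank : pvIsBlank (cols[c]'(by omega)) = false := by
      have h2 := hk c h; rw [htrue] at h2; simpa using h2.symm
    -- the tail's takeWhile/dropWhile stop exactly at column e
    have htw := takeWhile_eq_take_of (fun x => !pvIsBlank x) (cols.drop (c + 1)) (e - (c + 1))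
      (by simp; omega)
      (by
        intro i hi
        have hidx : c + 1 + i < ans.length := by omega
        have h1 : ans.getD (c + 1 + i) false = true :=
          pvScanEnd_true ans (c + 1) (c + 1 + i) (by omega) (by omega)
        have h2 := hk (c + 1 + i) hidx
        rw [List.getD_eq_getElem _ _ hidx] at h1
        rw [h1] at h2
        simp only [List.getElem_drop]
        simpa using h2.symm)
      (by
        intro hlt
        have hel' : e < ans.length := by simp at hlt; omega
        have h1 : ans.getD e false = false := pvScanEnd_stop ans (c + 1) hel'
        have h2 := hk e hel'
        rw [List.getD_eq_getElem _ _ hel'] at h1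
        rw [h1] at h2
        have hge : (cols.drop (c + 1))[e - (c + 1)]'hlt = cols[e]'(by omega) := by
          simp only [List.getElem_drop]
          congr 1
          omega
        rw [hge]
        simpa using h2.symm)
    rw [hdrop, pvGroups, if_neg (by simp [hblank]), htw.1, htw.2]
    have hde : (cols.drop (c + 1)).drop (e - (c + 1)) = cols.drop e := by
      rw [List.drop_drop]; congr 1; omega
    rw [hde, ih]
    simp only [List.map_cons, List.cons.injEq]
    refine ⟨?_, trivial⟩
    rw [hdrop]
    have : e - c = (e - (c + 1)) + 1 := by omega
    rw [this, List.take_succ_cons]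

-- pvZipN of a rectangular row list is the indexed transpose
theorem pvZipN_eq (w : Nat) : ∀ (rows : List (List Char)), rows ≠ [] →
    (∀ r ∈ rows, r.length = w) →
    pvZipN rows = (List.range w).map (fun c => rows.map (fun r => r.getD c ' ')) := by
  induction w with
  | zero =>
    intro rows hne hw
    rw [pvZipN]
    rw [dif_pos]
    · simp
    · right
      cases rows with
      | nil => simp at hne
      | cons a t =>
        have := hw a (by simp)
        simp [List.isEmpty_iff, List.eq_nil_of_length_eq_zero this]
  | succ w ih =>
    intro rows hne hw
    rw [pvZipN, dif_neg]
    · have htail : ∀ r ∈ rows.map List.tail, r.length = w := by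
        intro r hr
        rcases List.mem_map.mp hr with ⟨s, hs, rfl⟩
        have := hw s hs
        simp [this]
      have hne' : rows.map List.tail ≠ [] := by simpa using hne
      rw [ih (rows.map List.tail) hne' htail]
      rw [List.range_succ_eq_map]
      simp only [List.map_cons, List.map_map]
      congr 1
      · apply List.map_congr_left
        intro r hr
        have hlen := hw r hr
        cases r with
        | nil => simp at hlen
        | cons x xs => simp
      · apply List.map_congr_left
        intro c _
        simp only [Function.comp]
        apply List.map_congr_left
        intro r hr
        have hlen := hw r hr
        cases r with
        | nil => simp at hlen
        | cons x xs => simp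
    · rintro (h | h)
      · exact hne h
      · rcases List.any_eq_true.mp h with ⟨x, hx, hemp⟩
        have := hw x hx
        rw [List.isEmpty_iff] at hemp
        subst hemp; simp at this
  
-- a slice of a row of length w, s < e ≤ w, written as an indexed map
theorem slice_row_eq (row : List Char) (s e w : Nat) (hw : row.length = w)
    (hse : s ≤ e) (hew : e ≤ w) :
    (row.drop s).take (e - s) = (List.range' s (e - s)).map (fun c => row.getD c ' ') := by
  apply List.ext_getElem
  · simp [hw]; omega
  · intro i h1 h2
    simp only [List.getElem_take, List.getElem_drop, List.getElem_map, List.getElem_range']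
    rw [List.getD_eq_getElem]
    · congr 1; omega
    · simp at h1 ⊢; omega

theorem range_drop_take (w s k : Nat) (h : s + k ≤ w) :
    ((List.range w).drop s).take k = List.range' s k := by
  apply List.ext_getElem
  · simp; omega
  · intro i h1 h2
    simp only [List.getElem_take, List.getElem_drop, List.getElem_range, List.getElem_range']
    omega

-- ===== VERDICT (by name: the statement is the Claim_ definition above) =====
theorem split_columns_to_matrix_spec : Claim_equal_split_columns_to_matrix := by
  unfold Claim_equal_split_columns_to_matrix Spec_split_columns_to_matrix
  intro lines _
  unfold split_columns_to_matrix split_columns_to_matrix_alt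
  set rows := (PySem.Str.splitlines lines).map String.toList with hrows
  by_cases hne : rows = []
  · simp [hne]
  · simp only [if_neg hne]
    set w := (rows.map List.length).foldl max 0 with hw
    set padded := rows.map (fun r => r ++ List.replicate (w - r.length) ' ') with hpadded
    have hplen : ∀ r ∈ padded, r.length = w := by
      intro r hr
      rcases List.mem_map.mp hr with ⟨s, hs, rfl⟩
      have hle : s.length ≤ w := by
        have := PySem.List.le_foldl_max (rows.map List.length) 0
        exact this.2 s.length (List.mem_map.mpr ⟨s, hs, rfl⟩)
      simp; omega
    have hpne : padded ≠ [] := by simpa [hpadded] using hne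
    set ans := (List.range w).map (fun c => padded.any (fun ln => ln.getD c ' ' != ' ')) with hans
    have hzip := pvZipN_eq w padded hpne hplen
    set cols := pvZipN padded with hcols
    have hcols' : cols = (List.range w).map (fun c => padded.map (fun r => r.getD c ' ')) := hzip
    have hanslen : ans.length = w := by simp [hans]
    have hcolslen : cols.length = w := by simp [hcols']
    have hlen : ans.length = cols.length := by omega
    have hk : ∀ i (hi : i < ans.length), ans[i] = !pvIsBlank (cols[i]'(hlen ▸ hi)) := by
      intro i hi
      have hiw : i < w := by omega
      simp only [hans, hcols', List.getElem_map, List.getElem_range, pvIsBlank]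
      simp [List.any_map, List.all_map, Function.comp, List.any_eq_not_all_not]
      simp [Function.comp_def, bne]
    have hmain := groups_eq_spans ans cols hlen hk 0
    simp only [List.drop_zero] at hmain
    rw [hmain]
    rw [PySem.List.foldl_append_singleton_eq_map]
    simp only [List.nil_append, List.map_map]
    apply List.map_congr_left
    rintro ⟨s, e⟩ hmem
    have hbounds := pvSpans_bounds ans 0 _ hmem
    obtain ⟨-, hse, hel⟩ := hbounds
    have hew : e ≤ w := by omega
    simp only [Function.comp]
    rw [PySem.List.slice_to_neg_one]
    apply List.ext_getElem
    · simp
    · intro j h1 h2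
      simp only [List.getElem_map, List.getElem_dropLast, List.getElem_range]
      have hj : j < padded.length := by simp at h1; omega
      have hrowlen : (padded[j]'hj).length = w := hplen _ (List.getElem_mem hj)
      rw [PySem.List.slice_natCast]
      rw [slice_row_eq (padded[j]'hj) s e w hrowlen (by omega) hew]
      -- right side: the run of columns, taken from the transpose
      have hrun : (cols.drop s).take (e - s) =
          (List.range' s (e - s)).map (fun c => padded.map (fun r => r.getD c ' ')) := by
        rw [hcols', ← List.map_drop, ← List.map_take, range_drop_take w s (e - s) (by omega)]
      rw [hrun]
      simp only [List.map_map]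
      apply List.map_congr_left
      intro c hc
      have hcw : c < w := by
        have := List.mem_range'.mp hc  -- c ∈ range' s (e-s)
        omega
      simp only [Function.comp]
      have hchar : (padded[j]'hj).getD c ' ' =
          (padded.map (fun r => r.getD c ' ')).getD j ' ' := by
        have hj' : j < (padded.map (fun r => r.getD c ' ')).length := by simpa using hj
        rw [List.getD_eq_getElem _ _ hj']
        simp
      rw [hchar]
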